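-- pv_equiv track=rewrite | github.com/Jeff-Lowrey/leet_code | solutions/union-find/1319-number-of-operations-to-make-network-connected.py | makeConnectedAlternative
-- ===== SOURCE A (Python) =====
-- def makeConnectedAlternative(n: int, connections: list[list[int]]) -> int:
--     """
--     Alternative solution using manual component counting.
--
--     Args:
--         n: Number of computers
--         connections: Cable connections
--
--     Returns:
--         Minimum operations needed, or -1 if impossible
--     """
--     # Check if we have enough cables
--     if len(connections) < n - 1:
--         return -1
--
--     # Build adjacency graph
--     graph = [[] for _ in range(n)]
--     for a, b in connections:
--         graph[a].append(b)
--         graph[b].append(a)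
--
--     # Count connected components using DFS
--     visited = [False] * n
--     components = 0
--
--     def dfs(node):
--         visited[node] = True
--         for neighbor in graph[node]:
--             if not visited[neighbor]:
--                 dfs(neighbor)
--
--     for i in range(n):
--         if not visited[i]:
--             dfs(i)
--             components += 1
--
--     # Need (components - 1) operations to connect all
--     return components - 1
-- ===== SOURCE B (Python) =====
-- def makeConnectedAlternative(n: int, connections: list[list[int]]) -> int:
--     """Union-find (disjoint-set) reimplementation: no adjacency list, no DFS.
--
--     Same cable-shortage guard, then merge endpoint sets with union-by-smaller-root,
--     decrementing a component counter only on genuine merges.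
--     """
--     if len(connections) < n - 1:
--         return -1
--     parent = list(range(n))
--
--     def find(x):
--         while parent[x] != x:
--             x = parent[x]
--         return x
--
--     components = n
--     for a, b in connections:
--         ra = find(a)
--         rb = find(b)
--         if ra != rb:
--             if ra < rb:
--                 parent[rb] = ra
--             else:
--                 parent[ra] = rb
--             components -= 1
--     return components - 1
-- ===== Notes on version B (the rewrite author's own statement) =====
-- stated objective: alternative
-- what changed: Replaces the adjacency-list + recursive-DFS component count by a disjoint-set (union-find) pass over the edges: a parent array with union-by-smaller-root and a component counter that starts at n and decrements on each genuine merge; no graph is built and there is no recursion.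
-- outside the precondition, e.g. on makeConnectedAlternative(-1, []): A returns -1, B returns -2; on makeConnectedAlternative(3, [[-1, 0], [1, 2]]): A returns 0, B returns 0
import Mathlib
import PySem

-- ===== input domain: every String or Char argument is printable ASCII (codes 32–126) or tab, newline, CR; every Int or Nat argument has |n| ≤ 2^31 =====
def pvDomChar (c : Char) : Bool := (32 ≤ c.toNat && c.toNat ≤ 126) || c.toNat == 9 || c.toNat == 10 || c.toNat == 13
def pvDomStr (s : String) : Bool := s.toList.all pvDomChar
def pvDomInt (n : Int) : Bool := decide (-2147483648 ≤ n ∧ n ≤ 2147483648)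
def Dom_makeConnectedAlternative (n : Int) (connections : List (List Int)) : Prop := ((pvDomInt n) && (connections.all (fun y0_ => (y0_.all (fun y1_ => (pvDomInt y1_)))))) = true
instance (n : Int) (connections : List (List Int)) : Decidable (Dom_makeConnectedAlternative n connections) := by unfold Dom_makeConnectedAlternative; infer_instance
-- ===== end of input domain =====

-- B replaces A's adjacency-list + recursive-DFS component count by a disjoint-set
-- (union-find) pass over the edges (objective: alternative algorithm, same result on Pre_).


-- ===== PORT A =====
def pvBuildGraph (connections : List (List Int)) (g0 : List (List Int)) : List (List Int) :=
  connections.foldl (fun g e =>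
    match e with
    | [a, b] =>
        let g1 := g.modify a.toNat (fun l => l ++ [b])
        g1.modify b.toNat (fun l => l ++ [a])
    | _ => g) g0

def pvDfsA (g : List (List Int)) : Nat → List Bool → Int → List Bool
  | 0, v, _ => v
  | fuel+1, v, node =>
      (g.getD node.toNat []).foldl
        (fun w nb => if w.getD nb.toNat false then w else pvDfsA g fuel w nb)
        (v.set node.toNat true)

def makeConnectedAlternative (n : Int) (connections : List (List Int)) : Int :=
  if connections.length < n - 1 then -1
  else
    let N := n.toNat
    let graph := pvBuildGraph connections (List.replicate N [])
    let st := (List.range N).foldl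
      (fun (st : List Bool × Int) i =>
        if st.1.getD i false then st
        else (pvDfsA graph (N+1) st.1 (Int.ofNat i), st.2 + 1))
      (List.replicate N false, 0)
    st.2 - 1

-- ===== PORT B =====
def pvFindB (p : List Nat) : Nat → Nat → Nat
  | 0, x => x
  | fuel+1, x =>
      let px := p.getD x x
      if px = x then x else pvFindB p fuel px

def makeConnectedAlternative_alt (n : Int) (connections : List (List Int)) : Int :=
  if connections.length < n - 1 then -1
  else
    let N := n.toNat
    let st := connections.foldl
      (fun (st : List Nat × Int) e =>
        match e with
        | [a, b] =>
            let ra := pvFindB st.1 (N+1) a.toNat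
            let rb := pvFindB st.1 (N+1) b.toNat
            if ra = rb then st
            else if ra < rb then (st.1.set rb ra, st.2 - 1)
            else (st.1.set ra rb, st.2 - 1)
        | _ => st) (List.range N, n)
    st.2 - 1

-- ===== PRECONDITION & SPEC =====
-- Pre_ restricts to the task's natural domain: a non-negative computer count and (unless the
-- cable-shortage guard already answers) connections that are two-element lists of node
-- indices in [0, n); outside it A raises (IndexError/ValueError), except that A also returns
-- on negative n (giving -1) and on negative in-range indices via Python's index wraparound
-- (where B's Python happens to agree with A).
def Pre_makeConnectedAlternative (n : Int) (connections : List (List Int)) : Prop :=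
  0 ≤ n ∧
  ((connections.length : Int) < n - 1 ∨
    ∀ e ∈ connections, e.length = 2 ∧ ∀ x ∈ e, 0 ≤ x ∧ x < n)

instance (n : Int) (connections : List (List Int)) : Decidable (Pre_makeConnectedAlternative n connections) := by
  unfold Pre_makeConnectedAlternative; infer_instance

def pvWitness_makeConnectedAlternative : Int × List (List Int) :=
  (4, [[0, 1], [2, 3], [1, 2], [0, 3]])

def Spec_makeConnectedAlternative (n : Int) (connections : List (List Int)) (out : Int) : Prop := out = makeConnectedAlternative_alt n connections
instance (n : Int) (connections : List (List Int)) (out : Int) : Decidable (Spec_makeConnectedAlternative n connections out) := by unfold Spec_makeConnectedAlternative; infer_instance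

-- ===== CLAIM (what is proved, stated in full; the proofs are below) =====
def Claim_equal_makeConnectedAlternative : Prop := ∀ (n : Int) (connections : List (List Int)), Dom_makeConnectedAlternative n connections → Pre_makeConnectedAlternative n connections → Spec_makeConnectedAlternative n connections (makeConnectedAlternative n connections)

-- ===== LEMMAS AND PROOFS =====
-- ===== shared connectivity notions =====
def pvStep (c : List (List Int)) (x y : Int) : Prop := [x, y] ∈ c ∨ [y, x] ∈ c

def pvConn (c : List (List Int)) : Int → Int → Prop := Relation.ReflTransGen (pvStep c)

def pvWf (N : Nat) (c : List (List Int)) : Prop :=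
  ∀ e ∈ c, ∃ a b : Nat, a < N ∧ b < N ∧ e = [(a : Int), (b : Int)]

def pvMinRep (c : List (List Int)) (i : Nat) : Prop :=
  ∀ j : Nat, j < i → ¬ pvConn c (j : Int) (i : Int)

theorem pvConn_symm (c : List (List Int)) {x y : Int} (h : pvConn c x y) : pvConn c y x :=
  Relation.ReflTransGen.symmetric (fun _ _ hs => hs.symm) h

theorem pvStep_range {N : Nat} {c : List (List Int)} (hwf : pvWf N c) {x y : Int}
    (h : pvStep c x y) : ∃ a b : Nat, a < N ∧ b < N ∧ x = (a : Int) ∧ y = (b : Int) := by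
  rcases h with h | h
  · rcases hwf _ h with ⟨a, b, ha, hb, he⟩
    injection he with h1 h2; injection h2 with h2 _
    exact ⟨a, b, ha, hb, h1, h2⟩
  · rcases hwf _ h with ⟨a, b, ha, hb, he⟩
    injection he with h1 h2; injection h2 with h2 _
    exact ⟨b, a, hb, ha, h2, h1⟩

theorem pvStep_mono {c : List (List Int)} {e : List Int} {x y : Int}
    (h : pvStep c x y) : pvStep (c ++ [e]) x y := by
  rcases h with h | h
  · exact Or.inl (List.mem_append_left _ h)
  · exact Or.inr (List.mem_append_left _ h)

theorem pvConn_mono {c : List (List Int)} {e : List Int} {x y : Int}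
    (h : pvConn c x y) : pvConn (c ++ [e]) x y :=
  Relation.ReflTransGen.mono (fun _ _ hs => pvStep_mono hs) h

-- ===== small list lemmas =====
theorem pvGetD_set {α : Type} (l : List α) (i j : Nat) (a d : α) :
    (l.set i a).getD j d = if i = j ∧ j < l.length then a else l.getD j d := by
  simp only [List.getD, List.getElem?_set]
  by_cases hj : j < l.length
  · simp [List.getElem?_eq_getElem hj]
    split_ifs <;> simp_all
  · simp only [List.getElem?_eq_none (by omega : l.length ≤ j)]
    split_ifs <;> simp_all

theorem pvGetD_modify {α : Type} (l : List α) (i j : Nat) (f : α → α) (d : α) :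
    (l.modify i f).getD j d =
      if i = j ∧ j < l.length then f (l.getD j d) else l.getD j d := by
  simp only [List.getD, List.getElem?_modify]
  by_cases hj : j < l.length
  · simp [List.getElem?_eq_getElem hj]
    split_ifs <;> simp_all
  · simp only [List.getElem?_eq_none (by omega : l.length ≤ j)]
    split_ifs <;> simp_all
-- ===== visited-array order and false-count =====
def pvCF (v : List Bool) : Nat := v.count false

def pvLe (v w : List Bool) : Prop :=
  v.length = w.length ∧ ∀ i : Nat, v.getD i false = true → w.getD i false = true

theorem pvLe_refl (v : List Bool) : pvLe v v := ⟨rfl, fun _ h => h⟩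

theorem pvLe_trans {u v w : List Bool} (h1 : pvLe u v) (h2 : pvLe v w) : pvLe u w :=
  ⟨h1.1.trans h2.1, fun i hi => h2.2 i (h1.2 i hi)⟩

theorem pvLe_set (v : List Bool) (i : Nat) : pvLe v (v.set i true) := by
  refine ⟨(List.length_set ..).symm, fun j hj => ?_⟩
  rw [pvGetD_set]
  split_ifs <;> simp_all

theorem pvCF_le_of_pvLe {v w : List Bool} (h : pvLe v w) : pvCF w ≤ pvCF v := by
  obtain ⟨hlen, hle⟩ := h
  induction v generalizing w with
  | nil => cases w <;> simp_all [pvCF]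
  | cons a t ih =>
    cases w with
    | nil => simp at hlen
    | cons b t' =>
      have htail : pvCF t' ≤ pvCF t := by
        refine ih (by simpa using hlen) (fun i hi => ?_)
        have := hle (i+1) (by simpa using hi)
        simpa using this
      have hhead : a = true → b = true := by
        intro ha
        have := hle 0 (by simpa using ha)
        simpa using this
      simp only [pvCF, List.count_cons] at *
      cases a <;> cases b <;> simp_all <;> omega

theorem pvCF_set_lt {v : List Bool} {i : Nat} (hi : i < v.length)
    (hf : v.getD i false = false) : pvCF (v.set i true) < pvCF v := by
  induction v generalizing i with
  | nil => simp at hi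
  | cons a t ih =>
    cases i with
    | zero =>
      simp only [List.getD] at hf
      simp_all [pvCF, List.count_cons, List.set]
    | succ j =>
      have := ih (i := j) (by simpa using hi) (by simpa using hf)
      simp only [pvCF, List.set, List.count_cons] at *
      cases a <;> simp_all <;> omega

theorem pvCF_le_length (v : List Bool) : pvCF v ≤ v.length := List.count_le_length
-- ===== adjacency list built by port A =====
theorem pvBuildGraph_cons (e : List Int) (rest : List (List Int)) (g : List (List Int)) :
    pvBuildGraph (e :: rest) g =
      pvBuildGraph rest
        (match e with
         | [a, b] => (g.modify a.toNat (fun l => l ++ [b])).modify b.toNat (fun l => l ++ [a])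
         | _ => g) := by
  simp [pvBuildGraph]

theorem pvBuildGraph_mem {N : Nat} (c : List (List Int)) (g : List (List Int))
    (hwf : pvWf N c) (hg : g.length = N) {x : Nat} (hx : x < N) (z : Int) :
    z ∈ (pvBuildGraph c g).getD x [] ↔ z ∈ g.getD x [] ∨ pvStep c (x : Int) z := by
  induction c generalizing g with
  | nil => simp [pvBuildGraph, pvStep]
  | cons e rest ih =>
    obtain ⟨a, b, ha, hb, he⟩ := hwf e (List.mem_cons_self ..)
    subst he
    have hwf' : pvWf N rest := fun e' h' => hwf e' (List.mem_cons_of_mem _ h')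
    rw [pvBuildGraph_cons]
    simp only []
    have hlen1 : ((g.modify (Int.toNat a) (fun l => l ++ [(b : Int)])).modify
        (Int.toNat b) (fun l => l ++ [(a : Int)])).length = N := by
      simp [List.length_modify, hg]
    rw [ih _ hwf' hlen1]
    have h1 : z ∈ ((g.modify (Int.toNat a) (fun l => l ++ [(b : Int)])).modify
        (Int.toNat b) (fun l => l ++ [(a : Int)])).getD x []
        ↔ z ∈ g.getD x [] ∨ (x = a ∧ z = (b : Int)) ∨ (x = b ∧ z = (a : Int)) := by
      rw [pvGetD_modify, pvGetD_modify]
      simp only [Int.toNat_natCast, List.length_modify, hg]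
      by_cases hax : a = x <;> by_cases hbx : b = x <;>
        simp [hax, hbx, hx, eq_comm] <;> tauto
    rw [h1]
    have h2 : pvStep ((([(a : Int), (b : Int)]) : List Int) :: rest) (x : Int) z
        ↔ ((x = a ∧ z = (b : Int)) ∨ (x = b ∧ z = (a : Int))) ∨ pvStep rest (x : Int) z := by
      simp only [pvStep, List.mem_cons]
      constructor
      · rintro (h | h) <;> rcases h with h | h
        · injection h with h1 h2; injection h2 with h2 _
          exact Or.inl (Or.inl ⟨by exact_mod_cast h1, h2⟩)
        · exact Or.inr (Or.inl h)
        · injection h with h1 h2; injection h2 with h2 _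
          exact Or.inl (Or.inr ⟨by exact_mod_cast h2, h1⟩)
        · exact Or.inr (Or.inr h)
      · rintro ((⟨h1, h2⟩ | ⟨h1, h2⟩) | (h | h))
        · subst h1; subst h2; exact Or.inl (Or.inl rfl)
        · subst h1; subst h2; exact Or.inr (Or.inl rfl)
        · exact Or.inl (Or.inr h)
        · exact Or.inr (Or.inr h)
    rw [h2]
    tauto

theorem pvAdj_mem {N : Nat} {c : List (List Int)} (hwf : pvWf N c) {x : Nat} (hx : x < N)
    (z : Int) :
    z ∈ (pvBuildGraph c (List.replicate N ([] : List Int))).getD x [] ↔ pvStep c (x : Int) z := by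
  rw [pvBuildGraph_mem c _ hwf (by simp) hx z]
  simp [List.getD_eq_getElem _ _ (by simp [hx] : x < (List.replicate N ([] : List Int)).length)]
-- ===== DFS marking: specification =====
-- the inner fold over a neighbour list
theorem pvFold_spec {N : Nat} {c : List (List Int)} (g : List (List Int)) (f : Nat) (B : Nat)
    (node : Nat) (hwf : pvWf N c)
    (hsub : ∀ (w : List Bool) (m : Nat), pvCF w ≤ B → w.length = N → m < N →
      w.getD m false = false →
      (pvDfsA g f w (m : Int)).length = N ∧
      pvLe w (pvDfsA g f w (m : Int)) ∧
      (pvDfsA g f w (m : Int)).getD m false = true ∧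
      (∀ x : Nat, (pvDfsA g f w (m : Int)).getD x false = true →
        w.getD x false = true ∨ pvConn c (m : Int) (x : Int)) ∧
      (∀ x : Nat, x < N → (pvDfsA g f w (m : Int)).getD x false = true →
        w.getD x false = false →
        ∀ z : Int, pvStep c (x : Int) z → (pvDfsA g f w (m : Int)).getD z.toNat false = true)) :
    ∀ (l : List Int) (w : List Bool), (∀ nb ∈ l, pvStep c (node : Int) nb) →
      w.length = N → pvCF w ≤ B →
      (l.foldl (fun w nb => if w.getD nb.toNat false then w else pvDfsA g f w nb) w).length = N ∧
      pvLe w (l.foldl (fun w nb => if w.getD nb.toNat false then w else pvDfsA g f w nb) w) ∧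
      pvCF (l.foldl (fun w nb => if w.getD nb.toNat false then w else pvDfsA g f w nb) w) ≤ B ∧
      (∀ x : Nat,
        (l.foldl (fun w nb => if w.getD nb.toNat false then w else pvDfsA g f w nb) w).getD x false = true →
        w.getD x false = true ∨ pvConn c (node : Int) (x : Int)) ∧
      (∀ nb ∈ l,
        (l.foldl (fun w nb => if w.getD nb.toNat false then w else pvDfsA g f w nb) w).getD nb.toNat false = true) ∧
      (∀ x : Nat, x < N →
        (l.foldl (fun w nb => if w.getD nb.toNat false then w else pvDfsA g f w nb) w).getD x false = true →
        w.getD x false = false →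
        ∀ z : Int, pvStep c (x : Int) z →
        (l.foldl (fun w nb => if w.getD nb.toNat false then w else pvDfsA g f w nb) w).getD z.toNat false = true) := by
  intro l
  induction l with
  | nil =>
    intro w _ hwlen hwcf
    refine ⟨hwlen, pvLe_refl w, hwcf, fun x hx => Or.inl hx, by simp, fun x _ hx hnx => ?_⟩
    simp only [List.foldl_nil] at hx
    rw [hx] at hnx; cases hnx
  | cons nb rest ih =>
    intro w hsteps hwlen hwcf
    have hnbstep : pvStep c (node : Int) nb := hsteps nb (List.mem_cons_self ..)
    rw [List.foldl_cons]
    by_cases hvis : w.getD nb.toNat false = true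
    · rw [if_pos hvis]
      obtain ⟨hlen, hle, hcf, hsound, hproc, hclos⟩ :=
        ih w (fun m hm => hsteps m (List.mem_cons_of_mem _ hm)) hwlen hwcf
      exact ⟨hlen, hle, hcf, hsound,
        fun m hm => by
          rcases List.mem_cons.mp hm with h | h
          · subst h; exact hle.2 _ hvis
          · exact hproc m h,
        hclos⟩
    · rw [if_neg hvis]
      obtain ⟨ν', μ', _, hν, hx1, hz1⟩ := pvStep_range hwf hnbstep
      have hnb : nb = (μ' : Int) := hz1
      have hnbtoNat : nb.toNat = μ' := by rw [hnb]; exact Int.toNat_natCast _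
      have hwnb : w.getD μ' false = false := by
        rw [hnbtoNat] at hvis; simpa using Bool.of_not_eq_true hvis
      obtain ⟨h1len, h1le, h1node, h1sound, h1clos⟩ :=
        hsub w μ' hwcf hwlen hν hwnb
      rw [hnb]
      set w1 := pvDfsA g f w ((μ' : Nat) : Int) with hw1
      have hw1cf : pvCF w1 ≤ B := le_trans (pvCF_le_of_pvLe h1le) hwcf
      obtain ⟨hlen, hle, hcf, hsound, hproc, hclos⟩ :=
        ih w1 (fun m hm => hsteps m (List.mem_cons_of_mem _ hm)) h1len hw1cf
      have hnodestep : pvStep c (node : Int) ((μ' : Nat) : Int) := by rwa [hnb] at hnbstep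
      refine ⟨hlen, pvLe_trans h1le hle, hcf, ?_, ?_, ?_⟩
      · intro x hx
        rcases hsound x hx with h | h
        · rcases h1sound x h with h' | h'
          · exact Or.inl h'
          · exact Or.inr (Relation.ReflTransGen.head hnodestep h')
        · exact Or.inr h
      · intro m hm
        rcases List.mem_cons.mp hm with h | h
        · subst h; rw [Int.toNat_natCast]; exact hle.2 _ h1node
        · exact hproc m h
      · intro x hxN hx hnx z hz
        by_cases hx1 : w1.getD x false = true
        · exact hle.2 _ (h1clos x hxN hx1 hnx z hz)
        · exact hclos x hxN hx (Bool.of_not_eq_true hx1) z hz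

theorem pvDfs_spec {N : Nat} {c : List (List Int)} (g : List (List Int))
    (hadj : ∀ (x : Nat), x < N → ∀ z : Int, (z ∈ g.getD x [] ↔ pvStep c (x : Int) z))
    (hwf : pvWf N c) :
    ∀ (K fuel : Nat) (v : List Bool) (node : Nat), pvCF v = K → pvCF v < fuel →
      v.length = N → node < N → v.getD node false = false →
      (pvDfsA g fuel v (node : Int)).length = N ∧
      pvLe v (pvDfsA g fuel v (node : Int)) ∧
      (pvDfsA g fuel v (node : Int)).getD node false = true ∧
      (∀ x : Nat, (pvDfsA g fuel v (node : Int)).getD x false = true →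
        v.getD x false = true ∨ pvConn c (node : Int) (x : Int)) ∧
      (∀ x : Nat, x < N → (pvDfsA g fuel v (node : Int)).getD x false = true →
        v.getD x false = false →
        ∀ z : Int, pvStep c (x : Int) z → (pvDfsA g fuel v (node : Int)).getD z.toNat false = true) := by
  intro K
  induction K using Nat.strong_induction_on with
  | _ K IHK =>
  intro fuel v node hK hfuel hlen hnode hunv
  cases fuel with
  | zero => omega
  | succ f =>
    have hCFlt : pvCF v < f + 1 := hfuel
    -- unfold one step of pvDfsA
    have hunf : pvDfsA g (f+1) v (node : Int) =
        (g.getD ((node : Int)).toNat []).foldl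
          (fun w nb => if w.getD nb.toNat false then w else pvDfsA g f w nb)
          (v.set ((node : Int)).toNat true) := rfl
    rw [hunf, Int.toNat_natCast]
    set v1 := v.set node true with hv1
    have hv1len : v1.length = N := by simp [hv1, hlen]
    have hle1 : pvLe v v1 := pvLe_set v node
    have hv1cf : pvCF v1 < K := hK ▸ pvCF_set_lt (hlen ▸ hnode) hunv
    have hv1node : v1.getD node false = true := by
      rw [hv1, pvGetD_set]; simp [hlen ▸ hnode]
    have hsub : ∀ (w : List Bool) (m : Nat), pvCF w ≤ pvCF v1 → w.length = N → m < N →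
        w.getD m false = false →
        (pvDfsA g f w (m : Int)).length = N ∧
        pvLe w (pvDfsA g f w (m : Int)) ∧
        (pvDfsA g f w (m : Int)).getD m false = true ∧
        (∀ x : Nat, (pvDfsA g f w (m : Int)).getD x false = true →
          w.getD x false = true ∨ pvConn c (m : Int) (x : Int)) ∧
        (∀ x : Nat, x < N → (pvDfsA g f w (m : Int)).getD x false = true →
          w.getD x false = false →
          ∀ z : Int, pvStep c (x : Int) z → (pvDfsA g f w (m : Int)).getD z.toNat false = true) := by
      intro w m hwcf hwlen hm hwm
      exact IHK (pvCF w) (by omega) f w m rfl (by omega) hwlen hm hwm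
    obtain ⟨hlen', hle', hcf', hsound', hproc', hclos'⟩ :=
      pvFold_spec g f (pvCF v1) node hwf hsub (g.getD node []) v1
        (fun nb hnb => (hadj node hnode nb).mp hnb) hv1len (le_refl _)
    refine ⟨hlen', pvLe_trans hle1 hle', hle'.2 _ hv1node, ?_, ?_⟩
    · intro x hx
      rcases hsound' x hx with h | h
      · rw [hv1, pvGetD_set] at h
        by_cases hxn : node = x ∧ x < v.length
        · exact Or.inr (hxn.1 ▸ Relation.ReflTransGen.refl)
        · rw [if_neg hxn] at h; exact Or.inl h
      · exact Or.inr h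
    · intro x hxN hx hvx z hz
      by_cases hxn : x = node
      · subst hxn
        exact hproc' z ((hadj x hxN z).mpr hz)
      · have hv1x : v1.getD x false = false := by
          rw [hv1, pvGetD_set, if_neg (by tauto)]; exact hvx
        exact hclos' x hxN hx hv1x z hz
-- ===== the outer loop of port A counts minimal class representatives =====
theorem pvAloop_spec {N : Nat} {c : List (List Int)} (g : List (List Int))
    (hadj : ∀ (x : Nat), x < N → ∀ z : Int, (z ∈ g.getD x [] ↔ pvStep c (x : Int) z))
    (hwf : pvWf N c) :
    ∀ k : Nat, k ≤ N →
      ((List.range k).foldl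
        (fun (st : List Bool × Int) i =>
          if st.1.getD i false then st
          else (pvDfsA g (N+1) st.1 (Int.ofNat i), st.2 + 1))
        (List.replicate N false, 0)).1.length = N ∧
      (∀ x : Nat, x < N →
        (((List.range k).foldl
          (fun (st : List Bool × Int) i =>
            if st.1.getD i false then st
            else (pvDfsA g (N+1) st.1 (Int.ofNat i), st.2 + 1))
          (List.replicate N false, 0)).1.getD x false = true ↔
          ∃ j : Nat, j < k ∧ pvConn c (j : Int) (x : Int))) ∧
      ((List.range k).foldl
        (fun (st : List Bool × Int) i =>
          if st.1.getD i false then st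
          else (pvDfsA g (N+1) st.1 (Int.ofNat i), st.2 + 1))
        (List.replicate N false, 0)).2
        = ({i : Nat | i < k ∧ pvMinRep c i}.ncard : Int) := by
  intro k
  induction k with
  | zero =>
    intro _
    refine ⟨by simp, fun x hx => ?_, ?_⟩
    · simp only [List.range_zero, List.foldl_nil]
      rw [List.getD_replicate false hx]; simp
    · have : {i : Nat | i < 0 ∧ pvMinRep c i} = ∅ := by ext i; simp
      simp [this]
  | succ k ihk =>
    intro hk1
    have hk : k ≤ N := Nat.le_of_succ_le hk1
    have hkN : k < N := hk1
    obtain ⟨hlen, hchar, hcomp⟩ := ihk hk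
    rw [List.range_succ, List.foldl_append, List.foldl_cons, List.foldl_nil]
    set st := (List.range k).foldl
        (fun (st : List Bool × Int) i =>
          if st.1.getD i false then st
          else (pvDfsA g (N+1) st.1 (Int.ofNat i), st.2 + 1))
        (List.replicate N false, 0) with hst
    by_cases hvis : st.1.getD k false = true
    · rw [if_pos hvis]
      obtain ⟨j0, hj0, hconn0⟩ := (hchar k hkN).mp hvis
      refine ⟨hlen, fun x hx => ?_, ?_⟩
      · rw [hchar x hx]
        constructor
        · rintro ⟨j, hj, hc⟩; exact ⟨j, by omega, hc⟩
        · rintro ⟨j, hj, hc⟩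
          rcases Nat.lt_succ_iff_lt_or_eq.mp hj with h | h
          · exact ⟨j, h, hc⟩
          · subst h; exact ⟨j0, hj0, hconn0.trans hc⟩
      · rw [hcomp]
        congr 2
        ext i
        simp only [Set.mem_setOf_eq]
        constructor
        · rintro ⟨hi, hm⟩; exact ⟨by omega, hm⟩
        · rintro ⟨hi, hm⟩
          rcases Nat.lt_succ_iff_lt_or_eq.mp hi with h | h
          · exact ⟨h, hm⟩
          · subst h; exact absurd hconn0 (hm j0 hj0)
    · have hunv : st.1.getD k false = false := Bool.of_not_eq_true hvis
      rw [if_neg hvis]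
      have hcf : pvCF st.1 < N + 1 := by
        have := pvCF_le_length st.1; omega
      obtain ⟨hlen', hle', hnode', hsound', hclos'⟩ :=
        pvDfs_spec g hadj hwf (pvCF st.1) (N+1) st.1 k rfl hcf hlen hkN hunv
      have hgood : ∀ x : Nat, x < N → st.1.getD x false = true →
          ∀ z : Int, pvStep c (x : Int) z → st.1.getD z.toNat false = true := by
        intro x hx hvx z hz
        obtain ⟨j, hj, hc⟩ := (hchar x hx).mp hvx
        obtain ⟨a, b, _, hbN, hxa, hzb⟩ := pvStep_range hwf hz
        have : pvConn c (j : Int) z := hc.tail (hxa ▸ hz)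
        rw [hzb, Int.toNat_natCast]
        exact (hchar b hbN).mpr ⟨j, hj, hzb ▸ this⟩
      have hcompl : ∀ z : Int, pvConn c (k : Int) z → ∀ μ : Nat, z = (μ : Int) → μ < N →
          (pvDfsA g (N+1) st.1 (k : Int)).getD μ false = true := by
        intro z hconn
        induction hconn with
        | refl =>
          intro μ hμ hμN
          have hμk : μ = k := by exact_mod_cast hμ.symm
          subst hμk; exact hnode'
        | tail hky hyz ih =>
          rename_i y zf
          intro μ hμ hμN
          obtain ⟨a, b, haN, hbN, hya, hzb⟩ := pvStep_range hwf hyz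
          have hva' := ih a hya haN
          have hμb : μ = b := by rw [hμ] at hzb; exact_mod_cast hzb
          by_cases hva : st.1.getD a false = true
          · have := hgood a haN hva zf (hya ▸ hyz)
            rw [hzb, Int.toNat_natCast] at this
            rw [hμb]
            exact hle'.2 _ this
          · have := hclos' a haN hva' (Bool.of_not_eq_true hva) zf (hya ▸ hyz)
            rw [hzb, Int.toNat_natCast] at this
            rwa [hμb]
      have hminrep : pvMinRep c k := by
        intro j hj hc
        exact hvis ((hchar k hkN).mpr ⟨j, hj, hc⟩)
      refine ⟨hlen', fun x hx => ?_, ?_⟩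
      · constructor
        · intro hx'
          rcases hsound' x hx' with h | h
          · obtain ⟨j, hj, hc⟩ := (hchar x hx).mp h
            exact ⟨j, by omega, hc⟩
          · exact ⟨k, by omega, h⟩
        · rintro ⟨j, hj, hc⟩
          rcases Nat.lt_succ_iff_lt_or_eq.mp hj with h | h
          · exact hle'.2 _ ((hchar x hx).mpr ⟨j, h, hc⟩)
          · subst h; exact hcompl (x : Int) hc x rfl hx
      · have hsets : {i : Nat | i < k + 1 ∧ pvMinRep c i}
            = insert k {i : Nat | i < k ∧ pvMinRep c i} := by
          ext i
          simp only [Set.mem_setOf_eq, Set.mem_insert_iff]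
          constructor
          · rintro ⟨hi, hm⟩
            rcases Nat.lt_succ_iff_lt_or_eq.mp hi with h | h
            · exact Or.inr ⟨h, hm⟩
            · exact Or.inl h
          · rintro (h | ⟨hi, hm⟩)
            · subst h; exact ⟨by omega, hminrep⟩
            · exact ⟨by omega, hm⟩
        rw [hsets, Set.ncard_insert_of_notMem (by simp) (Set.Finite.subset
          (Set.finite_Iio k) (fun i hi => hi.1)), hcomp]
        push_cast; ring
-- ===== value of port A =====
theorem pvA_val (n : Int) (conns : List (List Int))
    (hguard : ¬((conns.length : Int) < n - 1)) (hwf : pvWf n.toNat conns) :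
    makeConnectedAlternative n conns
      = ({i : Nat | i < n.toNat ∧ pvMinRep conns i}.ncard : Int) - 1 := by
  unfold makeConnectedAlternative
  rw [if_neg hguard]
  have hadj := fun (x : Nat) (hx : x < n.toNat) (z : Int) => pvAdj_mem hwf hx z
  obtain ⟨-, -, hcomp⟩ := pvAloop_spec (pvBuildGraph conns (List.replicate n.toNat []))
    hadj hwf n.toNat (le_refl _)
  show _ - (1:Int) = _
  rw [hcomp]
-- ===== union-find roots (port B) =====
def pvDec (p : List Nat) : Prop := ∀ i : Nat, i < p.length → p.getD i 0 ≤ i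

def pvRoot (N : Nat) (p : List Nat) (x : Nat) : Nat := pvFindB p (N+1) x

theorem pvGetD_self_eq (p : List Nat) (x : Nat) (hx : x < p.length) :
    p.getD x x = p.getD x 0 := by
  rw [List.getD_eq_getElem _ _ hx, List.getD_eq_getElem _ _ hx]

theorem pvFind_fuel (p : List Nat) (hdec : pvDec p) :
    ∀ x : Nat, ∀ f1 f2 : Nat, x < p.length → x < f1 → x < f2 →
      pvFindB p f1 x = pvFindB p f2 x := by
  intro x
  induction x using Nat.strong_induction_on with
  | _ x IH =>
  intro f1 f2 hx hf1 hf2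
  cases f1 with
  | zero => omega
  | succ g1 =>
  cases f2 with
  | zero => omega
  | succ g2 =>
  show (if p.getD x x = x then x else pvFindB p g1 (p.getD x x))
      = (if p.getD x x = x then x else pvFindB p g2 (p.getD x x))
  by_cases hroot : p.getD x x = x
  · rw [if_pos hroot, if_pos hroot]
  · rw [if_neg hroot, if_neg hroot]
    have hle : p.getD x x ≤ x := pvGetD_self_eq p x hx ▸ hdec x hx
    have hlt : p.getD x x < x := lt_of_le_of_ne hle hroot
    exact IH _ hlt g1 g2 (by omega) (by omega) (by omega)

theorem pvRoot_rec {N : Nat} {p : List Nat} (hdec : pvDec p) (hlen : p.length = N)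
    {x : Nat} (hx : x < N) :
    pvRoot N p x = if p.getD x 0 = x then x else pvRoot N p (p.getD x 0) := by
  show (if p.getD x x = x then x else pvFindB p N (p.getD x x)) = _
  rw [pvGetD_self_eq p x (hlen ▸ hx)]
  by_cases hroot : p.getD x 0 = x
  · rw [if_pos hroot, if_pos hroot]
  · rw [if_neg hroot, if_neg hroot]
    have hle : p.getD x 0 ≤ x := hdec x (hlen ▸ hx)
    have hlt : p.getD x 0 < x := lt_of_le_of_ne hle hroot
    exact pvFind_fuel p hdec _ _ _ (by omega) (by omega) (by omega)

theorem pvRoot_spec {N : Nat} {p : List Nat} (hdec : pvDec p) (hlen : p.length = N) :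
    ∀ x : Nat, x < N →
      pvRoot N p x ≤ x ∧ pvRoot N p x < N ∧ p.getD (pvRoot N p x) 0 = pvRoot N p x := by
  intro x
  induction x using Nat.strong_induction_on with
  | _ x IH =>
  intro hx
  rw [pvRoot_rec hdec hlen hx]
  by_cases hroot : p.getD x 0 = x
  · rw [if_pos hroot]; exact ⟨le_refl _, hx, hroot⟩
  · rw [if_neg hroot]
    have hlt : p.getD x 0 < x := lt_of_le_of_ne (hdec x (hlen ▸ hx)) hroot
    obtain ⟨h1, h2, h3⟩ := IH _ hlt (by omega)
    exact ⟨by omega, h2, h3⟩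

theorem pvRoot_of_root {N : Nat} {p : List Nat} (hdec : pvDec p) (hlen : p.length = N)
    {x : Nat} (hx : x < N) (hroot : p.getD x 0 = x) : pvRoot N p x = x := by
  rw [pvRoot_rec hdec hlen hx, if_pos hroot]

theorem pvRoot_fix {N : Nat} {p : List Nat} (hdec : pvDec p) (hlen : p.length = N)
    {x : Nat} (hx : x < N) (hfix : pvRoot N p x = x) : p.getD x 0 = x := by
  by_cases hroot : p.getD x 0 = x
  · exact hroot
  · rw [pvRoot_rec hdec hlen hx, if_neg hroot] at hfix
    have hlt : p.getD x 0 < x := lt_of_le_of_ne (hdec x (hlen ▸ hx)) hroot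
    have h2 := (pvRoot_spec hdec hlen (p.getD x 0) (by omega)).1
    omega

theorem pvRoot_conn {N : Nat} {p : List Nat} {c : List (List Int)}
    (hdec : pvDec p) (hlen : p.length = N)
    (hc2 : ∀ i : Nat, i < N → pvConn c ((p.getD i 0 : Nat) : Int) (i : Int)) :
    ∀ x : Nat, x < N → pvConn c ((pvRoot N p x : Nat) : Int) (x : Int) := by
  intro x
  induction x using Nat.strong_induction_on with
  | _ x IH =>
  intro hx
  rw [pvRoot_rec hdec hlen hx]
  by_cases hroot : p.getD x 0 = x
  · rw [if_pos hroot]; exact Relation.ReflTransGen.refl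
  · rw [if_neg hroot]
    have hlt : p.getD x 0 < x := lt_of_le_of_ne (hdec x (hlen ▸ hx)) hroot
    exact (IH _ hlt (by omega)).trans (hc2 x hx)

theorem pvDec_set {p : List Nat} (hdec : pvDec p) {rmin rmax : Nat} (h : rmin < rmax) :
    pvDec (p.set rmax rmin) := by
  intro i hi
  rw [List.length_set] at hi
  rw [pvGetD_set]
  split_ifs with hcase
  · omega
  · exact hdec i hi

theorem pvRoot_set {N : Nat} {p : List Nat} (hdec : pvDec p) (hlen : p.length = N)
    {rmin rmax : Nat} (hlt : rmin < rmax) (hmaxN : rmax < N)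
    (hmaxroot : p.getD rmax 0 = rmax) (hminroot : p.getD rmin 0 = rmin) :
    ∀ x : Nat, x < N →
      pvRoot N (p.set rmax rmin) x = if pvRoot N p x = rmax then rmin else pvRoot N p x := by
  have hdec' : pvDec (p.set rmax rmin) := pvDec_set hdec hlt
  have hlen' : (p.set rmax rmin).length = N := by simp [hlen]
  have hminN : rmin < N := by omega
  have hget' : ∀ j : Nat, j < N → (p.set rmax rmin).getD j 0 =
      if j = rmax then rmin else p.getD j 0 := by
    intro j hj
    rw [pvGetD_set]
    by_cases hcase : j = rmax
    · subst hcase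
      rw [if_pos ⟨rfl, hlen.symm ▸ hmaxN⟩, if_pos rfl]
    · rw [if_neg (fun h => hcase h.1.symm), if_neg hcase]
  intro x
  induction x using Nat.strong_induction_on with
  | _ x IH =>
  intro hx
  by_cases hxmax : x = rmax
  · rw [hxmax]
    have hgmax : (p.set rmax rmin).getD rmax 0 = rmin := by
      rw [hget' rmax hmaxN]; simp
    have h1 : pvRoot N (p.set rmax rmin) rmax = pvRoot N (p.set rmax rmin) rmin := by
      rw [pvRoot_rec hdec' hlen' hmaxN, hgmax, if_neg (Nat.ne_of_lt hlt)]
    rw [h1, pvRoot_of_root hdec' hlen' hminN (by rw [hget' rmin hminN, if_neg (Nat.ne_of_lt hlt)]; exact hminroot),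
      pvRoot_of_root hdec hlen hmaxN hmaxroot]
    simp
  · rw [pvRoot_rec hdec' hlen' hx, hget' x hx, if_neg hxmax]
    by_cases hroot : p.getD x 0 = x
    · rw [if_pos hroot]
      rw [pvRoot_of_root hdec hlen hx hroot]
      rw [if_neg hxmax]
    · rw [if_neg hroot]
      have hlt2 : p.getD x 0 < x := lt_of_le_of_ne (hdec x (hlen ▸ hx)) hroot
      rw [IH _ hlt2 (by omega), pvRoot_rec hdec hlen hx, if_neg hroot]
-- ===== invariant of port B's edge loop =====
def pvInv (N : Nat) (c : List (List Int)) (st : List Nat × Int) : Prop :=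
  st.1.length = N ∧ pvDec st.1 ∧
  (∀ i : Nat, i < N → pvConn c ((st.1.getD i 0 : Nat) : Int) (i : Int)) ∧
  (∀ u v : Nat, u < N → v < N → pvStep c (u : Int) (v : Int) →
    pvRoot N st.1 u = pvRoot N st.1 v) ∧
  st.2 = ({i : Nat | i < N ∧ st.1.getD i 0 = i}.ncard : Int)

theorem pvUnion_inv (N : Nat) (c : List (List Int)) (p : List Nat) (cnt : Int)
    (hinv : pvInv N c (p, cnt)) (α β : Nat) (hα : α < N) (hβ : β < N)
    (rmin rmax : Nat) (hlt : rmin < rmax)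
    (hmm : (rmin = pvRoot N p α ∧ rmax = pvRoot N p β) ∨
           (rmin = pvRoot N p β ∧ rmax = pvRoot N p α)) :
    pvInv N (c ++ [[(α : Int), (β : Int)]]) (p.set rmax rmin, cnt - 1) := by
  obtain ⟨hlen, hdec, hc1, hc2, hc3⟩ := hinv
  have hra := pvRoot_spec hdec hlen α hα
  have hrb := pvRoot_spec hdec hlen β hβ
  have hmaxN : rmax < N := by rcases hmm with ⟨_, h⟩ | ⟨_, h⟩ <;> rw [h] <;> [exact hrb.2.1; exact hra.2.1]
  have hminN : rmin < N := by omega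
  have hmaxroot : p.getD rmax 0 = rmax := by
    rcases hmm with ⟨_, h⟩ | ⟨_, h⟩ <;> rw [h] <;> [exact hrb.2.2; exact hra.2.2]
  have hminroot : p.getD rmin 0 = rmin := by
    rcases hmm with ⟨h, _⟩ | ⟨h, _⟩ <;> rw [h] <;> [exact hra.2.2; exact hrb.2.2]
  have hrootset := pvRoot_set hdec hlen hlt hmaxN hmaxroot hminroot
  have hstepnew : pvStep (c ++ [[(α : Int), (β : Int)]]) (α : Int) (β : Int) :=
    Or.inl (List.mem_append_right _ (List.mem_singleton.mpr rfl))
  have hconnminmax : pvConn (c ++ [[(α : Int), (β : Int)]]) (rmin : Int) (rmax : Int) := by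
    have h1 : pvConn (c ++ [[(α : Int), (β : Int)]]) ((pvRoot N p α : Nat) : Int) (β : Int) :=
      ((pvConn_mono (pvRoot_conn hdec hlen hc1 α hα)).tail hstepnew)
    have h2 : pvConn (c ++ [[(α : Int), (β : Int)]]) ((pvRoot N p α : Nat) : Int)
        ((pvRoot N p β : Nat) : Int) :=
      h1.trans (pvConn_symm _ (pvConn_mono (pvRoot_conn hdec hlen hc1 β hβ)))
    rcases hmm with ⟨h3, h4⟩ | ⟨h3, h4⟩
    · rw [h3, h4]; exact h2
    · rw [h3, h4]; exact pvConn_symm _ h2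
  have hget' : ∀ j : Nat, j < N → (p.set rmax rmin).getD j 0 =
      if j = rmax then rmin else p.getD j 0 := by
    intro j hj
    rw [pvGetD_set]
    by_cases hcase : j = rmax
    · subst hcase
      rw [if_pos ⟨rfl, hlen.symm ▸ hmaxN⟩, if_pos rfl]
    · rw [if_neg (fun h => hcase h.1.symm), if_neg hcase]
  refine ⟨by simp [hlen], pvDec_set hdec hlt, ?_, ?_, ?_⟩
  · intro i hi
    rw [hget' i hi]
    by_cases hcase : i = rmax
    · rw [if_pos hcase, hcase]; exact hconnminmax
    · rw [if_neg hcase]; exact pvConn_mono (hc1 i hi)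
  · intro u v hu hv hstep
    rw [hrootset u hu, hrootset v hv]
    rcases hstep with h | h
    · rcases List.mem_append.mp h with h' | h'
      · have := hc2 u v hu hv (Or.inl h'); rw [this]
      · have he : u = α ∧ v = β := by
          have := List.mem_singleton.mp h'
          injection this with h1 h2; injection h2 with h2 _
          exact ⟨by exact_mod_cast h1, by exact_mod_cast h2⟩
        rw [he.1, he.2]
        rcases hmm with ⟨h3, h4⟩ | ⟨h3, h4⟩ <;>
          rw [← h3, ← h4] <;> split_ifs <;> omega
    · rcases List.mem_append.mp h with h' | h'
      · have := hc2 v u hv hu (Or.inl h'); rw [this]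
      · have he : v = α ∧ u = β := by
          have := List.mem_singleton.mp h'
          injection this with h1 h2; injection h2 with h2 _
          exact ⟨by exact_mod_cast h1, by exact_mod_cast h2⟩
        rw [he.1, he.2]
        rcases hmm with ⟨h3, h4⟩ | ⟨h3, h4⟩ <;>
          rw [← h3, ← h4] <;> split_ifs <;> omega
  · have hsets : {i : Nat | i < N ∧ (p.set rmax rmin).getD i 0 = i}
        = {i : Nat | i < N ∧ p.getD i 0 = i} \ {rmax} := by
      ext i
      simp only [Set.mem_setOf_eq, Set.mem_diff, Set.mem_singleton_iff]
      constructor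
      · rintro ⟨hi, hfix⟩
        rw [hget' i hi] at hfix
        by_cases hcase : i = rmax
        · rw [if_pos hcase] at hfix; omega
        · rw [if_neg hcase] at hfix; exact ⟨⟨hi, hfix⟩, hcase⟩
      · rintro ⟨⟨hi, hfix⟩, hne⟩
        refine ⟨hi, ?_⟩
        rw [hget' i hi, if_neg hne]; exact hfix
    have hfin : {i : Nat | i < N ∧ p.getD i 0 = i}.Finite :=
      Set.Finite.subset (Set.finite_Iio N) (fun i hi => hi.1)
    have hmem : rmax ∈ {i : Nat | i < N ∧ p.getD i 0 = i} := ⟨hmaxN, hmaxroot⟩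
    have hpos : 1 ≤ {i : Nat | i < N ∧ p.getD i 0 = i}.ncard :=
      (Set.ncard_pos hfin).mpr ⟨rmax, hmem⟩
    have hc3' : cnt = ({i : Nat | i < N ∧ p.getD i 0 = i}.ncard : Int) := hc3
    show cnt - 1 = _
    rw [hsets, Set.ncard_diff_singleton_of_mem hmem, hc3', Nat.cast_sub hpos]
    push_cast; ring

def pvStepB (N : Nat) (st : List Nat × Int) (e : List Int) : List Nat × Int :=
  match e with
  | [a, b] =>
      let ra := pvFindB st.1 (N+1) a.toNat
      let rb := pvFindB st.1 (N+1) b.toNat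
      if ra = rb then st
      else if ra < rb then (st.1.set rb ra, st.2 - 1)
      else (st.1.set ra rb, st.2 - 1)
  | _ => st

theorem pvStepB_inv (N : Nat) (c : List (List Int)) (st : List Nat × Int)
    (e : List Int) (hinv : pvInv N c st)
    (hwfe : ∃ a b : Nat, a < N ∧ b < N ∧ e = [(a : Int), (b : Int)]) :
    pvInv N (c ++ [e]) (pvStepB N st e) := by
  obtain ⟨α, β, hα, hβ, he⟩ := hwfe
  subst he
  rw [pvStepB]
  obtain ⟨p, cnt⟩ := st
  show pvInv N _
    (let ra := pvFindB p (N+1) ((α : Int)).toNat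
     let rb := pvFindB p (N+1) ((β : Int)).toNat
     if ra = rb then (p, cnt)
     else if ra < rb then (p.set rb ra, cnt - 1)
     else (p.set ra rb, cnt - 1))
  simp only [Int.toNat_natCast]
  have hra : pvFindB p (N+1) α = pvRoot N p α := rfl
  have hrb : pvFindB p (N+1) β = pvRoot N p β := rfl
  rw [hra, hrb]
  obtain ⟨hlen, hdec, hc1, hc2, hc3⟩ := hinv
  by_cases heq : pvRoot N p α = pvRoot N p β
  · rw [if_pos heq]
    refine ⟨hlen, hdec, fun i hi => pvConn_mono (hc1 i hi), ?_, hc3⟩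
    intro u v hu hv hstep
    rcases hstep with h | h
    · rcases List.mem_append.mp h with h' | h'
      · exact hc2 u v hu hv (Or.inl h')
      · have heuv : u = α ∧ v = β := by
          have := List.mem_singleton.mp h'
          injection this with h1 h2; injection h2 with h2 _
          exact ⟨by exact_mod_cast h1, by exact_mod_cast h2⟩
        rw [heuv.1, heuv.2]; exact heq
    · rcases List.mem_append.mp h with h' | h'
      · exact (hc2 v u hv hu (Or.inl h')).symm
      · have heuv : v = α ∧ u = β := by
          have := List.mem_singleton.mp h'
          injection this with h1 h2; injection h2 with h2 _
          exact ⟨by exact_mod_cast h1, by exact_mod_cast h2⟩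
        rw [heuv.1, heuv.2]; exact heq.symm
  · rw [if_neg heq]
    by_cases hltc : pvRoot N p α < pvRoot N p β
    · rw [if_pos hltc]
      exact pvUnion_inv N c p cnt ⟨hlen, hdec, hc1, hc2, hc3⟩ α β hα hβ
        _ _ hltc (Or.inl ⟨rfl, rfl⟩)
    · rw [if_neg hltc]
      have hltc' : pvRoot N p β < pvRoot N p α := by omega
      exact pvUnion_inv N c p cnt ⟨hlen, hdec, hc1, hc2, hc3⟩ α β hα hβ
        _ _ hltc' (Or.inr ⟨rfl, rfl⟩)
-- ===== running the whole edge loop =====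
theorem pvBloop_inv (N : Nat) :
    ∀ (suffix prefixc : List (List Int)) (st : List Nat × Int),
      pvWf N suffix → pvInv N prefixc st →
      pvInv N (prefixc ++ suffix)
        (suffix.foldl (pvStepB N) st) := by
  intro suffix
  induction suffix with
  | nil => intro prefixc st _ hinv; simpa using hinv
  | cons e rest ih =>
    intro prefixc st hwf hinv
    rw [List.foldl_cons]
    have hwfe := hwf e (List.mem_cons_self ..)
    have hstep := pvStepB_inv N prefixc st e hinv hwfe
    have hwfrest : pvWf N rest := fun e' h' => hwf e' (List.mem_cons_of_mem _ h')
    have hthis := ih (prefixc ++ [e]) _ hwfrest hstep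
    have hre : prefixc ++ e :: rest = (prefixc ++ [e]) ++ rest := by simp
    rw [hre]
    exact hthis

theorem pvInv_init (n : Int) (h0 : 0 ≤ n) :
    pvInv n.toNat [] (List.range n.toNat, n) := by
  have hget : ∀ i : Nat, i < n.toNat → (List.range n.toNat).getD i 0 = i := by
    intro i hi
    rw [List.getD_eq_getElem _ _ (by simpa using hi), List.getElem_range]
  refine ⟨by simp, fun i hi => by rw [hget i (by simpa using hi)], ?_, ?_, ?_⟩
  · intro i hi; rw [hget i hi]; exact Relation.ReflTransGen.refl
  · intro u v _ _ hstep
    rcases hstep with h | h <;> cases h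
  · show n = _
    have hsets : {i : Nat | i < n.toNat ∧ (List.range n.toNat).getD i 0 = i}
        = Set.Iio n.toNat := by
      ext i
      simp only [Set.mem_setOf_eq, Set.mem_Iio]
      constructor
      · rintro ⟨hi, _⟩; exact hi
      · intro hi; exact ⟨hi, hget i hi⟩
    rw [hsets, Set.ncard_Iio_nat]
    exact (Int.toNat_of_nonneg h0).symm

-- ===== fixpoints of the final parent array are the minimal representatives =====
theorem pvFix_eq_minRep {N : Nat} {c : List (List Int)} (st : List Nat × Int)
    (hwf : pvWf N c) (hinv : pvInv N c st) :
    {i : Nat | i < N ∧ st.1.getD i 0 = i} = {i : Nat | i < N ∧ pvMinRep c i} := by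
  have hlen : st.1.length = N := hinv.1
  have hdec : pvDec st.1 := hinv.2.1
  have hc1 : ∀ i : Nat, i < N → pvConn c ((st.1.getD i 0 : Nat) : Int) (i : Int) := hinv.2.2.1
  have hc2 : ∀ u v : Nat, u < N → v < N → pvStep c (u : Int) (v : Int) →
      pvRoot N st.1 u = pvRoot N st.1 v := hinv.2.2.2.1
  have hcong : ∀ (u : Nat), u < N → ∀ z : Int, pvConn c (u : Int) z →
      ∀ μ : Nat, z = (μ : Int) → μ < N → pvRoot N st.1 u = pvRoot N st.1 μ := by
    intro u hu z hconn
    induction hconn with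
    | refl =>
      intro μ hμ hμN
      have : μ = u := by exact_mod_cast hμ.symm
      rw [this]
    | tail hky hyz ih =>
      rename_i y zf
      intro μ hμ hμN
      obtain ⟨a, b, haN, hbN, hya, hzb⟩ := pvStep_range hwf hyz
      have hμb : μ = b := by rw [hμ] at hzb; exact_mod_cast hzb
      have h1 := ih a hya haN
      have h2 := hc2 a b haN hbN (by rw [← hya, ← hzb]; exact hyz)
      rw [hμb, h1, h2]
  ext i
  simp only [Set.mem_setOf_eq]
  constructor
  · rintro ⟨hi, hfix⟩
    refine ⟨hi, fun j hj hconn => ?_⟩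
    have hjN : j < N := by omega
    have hroots := pvRoot_spec hdec hlen j hjN
    have hji := hcong j hjN (i : Int) hconn i rfl hi
    rw [pvRoot_of_root hdec hlen hi hfix] at hji
    omega
  · rintro ⟨hi, hmin⟩
    refine ⟨hi, ?_⟩
    have hroots := pvRoot_spec hdec hlen i hi
    by_cases hfix : pvRoot N st.1 i = i
    · exact pvRoot_fix hdec hlen hi hfix
    · have hrlt : pvRoot N st.1 i < i := by omega
      have hconn := pvRoot_conn hdec hlen hc1 i hi
      exact absurd hconn (hmin _ hrlt)

-- ===== value of port B =====
theorem pvB_val (n : Int) (conns : List (List Int)) (h0 : 0 ≤ n)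
    (hguard : ¬((conns.length : Int) < n - 1)) (hwf : pvWf n.toNat conns) :
    makeConnectedAlternative_alt n conns
      = ({i : Nat | i < n.toNat ∧ pvMinRep conns i}.ncard : Int) - 1 := by
  unfold makeConnectedAlternative_alt
  rw [if_neg hguard]
  have hinv := pvBloop_inv n.toNat conns [] (List.range n.toNat, n) hwf (pvInv_init n h0)
  rw [List.nil_append] at hinv
  show (conns.foldl (pvStepB n.toNat) (List.range n.toNat, n)).2 - 1 = _
  rw [hinv.2.2.2.2, pvFix_eq_minRep _ hwf hinv]
-- ===== main equivalence =====
theorem pvMain (n : Int) (conns : List (List Int))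
    (h0 : 0 ≤ n)
    (hcase : (conns.length : Int) < n - 1 ∨
      ∀ e ∈ conns, e.length = 2 ∧ ∀ x ∈ e, 0 ≤ x ∧ x < n) :
    makeConnectedAlternative n conns = makeConnectedAlternative_alt n conns := by
  by_cases hguard : (conns.length : Int) < n - 1
  · unfold makeConnectedAlternative makeConnectedAlternative_alt
    rw [if_pos hguard, if_pos hguard]
  · have hwfe : ∀ e ∈ conns, e.length = 2 ∧ ∀ x ∈ e, 0 ≤ x ∧ x < n := by
      rcases hcase with h | h
      · exact absurd h hguard
      · exact h
    have hwf : pvWf n.toNat conns := by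
      intro e he
      obtain ⟨hlen2, hbound⟩ := hwfe e he
      rcases e with _ | ⟨x, _ | ⟨y, _ | ⟨z, t⟩⟩⟩ <;> simp at hlen2
      have hx := hbound x (by simp)
      have hy := hbound y (by simp)
      refine ⟨x.toNat, y.toNat, by omega, by omega, ?_⟩
      rw [Int.toNat_of_nonneg hx.1, Int.toNat_of_nonneg hy.1]
    rw [pvA_val n conns hguard hwf, pvB_val n conns h0 hguard hwf]

-- ===== VERDICT (by name: the statement is the Claim_ definition above) =====
theorem makeConnectedAlternative_spec : Claim_equal_makeConnectedAlternative := by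
  intro n conns _ hpre
  unfold Pre_makeConnectedAlternative at hpre
  unfold Spec_makeConnectedAlternative
  exact pvMain n conns hpre.1 hpre.2
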